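-- pv_equiv track=rewrite | github.com/RyantheKing/password-game-solver | solver.py | sum_25
-- ===== SOURCE A (Python) =====
-- def digit_sum(password : str):
--     """
--     Get the sum of all digits in the given password
--     :param password: The password to sum
--     :return: The sum of all digits in the password
--     """
--     return sum([int(num) for num in password if num.isdigit()])
--
-- def sum_25(password: str) -> str:
--     """
--     Print out a string to compensate for the missing digits in the password
--     :param password: The password with digits in it to compensate for
--     :return: The string to add to the password
--     """
--     diff = 25 - digit_sum(password)
--     return_str = ""
--     while diff > 9:
--         return_str += "9"
--         diff -= 9
--     return_str += str(diff)
--     return return_str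
-- ===== SOURCE B (Python) =====
-- def digit_sum(password: str):
--     total = 0
--     for c in password:
--         if c.isdigit():
--             total += int(c)
--     return total
--
-- def sum_25(password: str) -> str:
--     diff = 25 - digit_sum(password)
--     if diff <= 9:
--         return str(diff)
--     n, r = divmod(diff - 1, 9)
--     return "9" * n + str(r + 1)
-- ===== Notes on version B (the rewrite author's own statement) =====
-- stated objective: simpler
-- what changed: Replaces A's subtract-9 while-loop that accumulates '9' characters with a closed-form divmod: n, r = divmod(diff - 1, 9) and the answer is '9'*n + str(r+1) (single-digit and non-positive diffs returned directly as str(diff)).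
import Mathlib
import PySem

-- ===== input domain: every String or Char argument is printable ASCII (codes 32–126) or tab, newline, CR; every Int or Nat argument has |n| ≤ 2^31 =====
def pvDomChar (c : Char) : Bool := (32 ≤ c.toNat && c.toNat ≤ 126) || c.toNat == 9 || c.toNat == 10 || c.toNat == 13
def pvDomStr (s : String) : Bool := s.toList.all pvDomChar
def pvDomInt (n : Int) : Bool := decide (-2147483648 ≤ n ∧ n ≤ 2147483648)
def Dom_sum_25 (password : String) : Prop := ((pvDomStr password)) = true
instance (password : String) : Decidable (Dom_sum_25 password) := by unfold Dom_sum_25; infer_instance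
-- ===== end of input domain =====

-- B replaces A's subtract-9 while-loop with a closed-form divmod build of the same string (objective: simpler).

-- ===== PORT A =====
-- digit_sum: sum([int(num) for num in password if num.isdigit()])
-- int(c) on a digit char is exact as (c.toNat - 48) on the ASCII domain
def pvDigitSumA (password : String) : Int :=
  ((password.toList.filter (fun c => PySem.Chars.isdigit c)).map
    (fun c => ((c.toNat : Int) - 48))).sum

-- the while-loop of A, on the character list of return_str
def pvLoopA (diff : Int) (returnStr : List Char) : List Char :=
  if diff > 9 then pvLoopA (diff - 9) (returnStr ++ ['9'])
  else returnStr ++ PySem.Int.toChars diff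
termination_by diff.toNat
decreasing_by omega

def sum_25 (password : String) : String :=
  String.ofList (pvLoopA (25 - pvDigitSumA password) [])

-- ===== PORT B =====
-- digit_sum in Source B: explicit accumulator loop
def pvDigitSumB (password : String) : Int :=
  password.toList.foldl
    (fun total c => if PySem.Chars.isdigit c then total + ((c.toNat : Int) - 48) else total) 0

-- closed-form body of Source B's sum_25 given diff
def pvClosedB (diff : Int) : List Char :=
  if diff ≤ 9 then PySem.Int.toChars diff
  else
    List.replicate (PySem.Int.floordiv (diff - 1) 9).toNat '9'
      ++ PySem.Int.toChars (PySem.Int.mod (diff - 1) 9 + 1)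

def sum_25_alt (password : String) : String :=
  String.ofList (pvClosedB (25 - pvDigitSumB password))

-- ===== PRECONDITION & SPEC =====
def Spec_sum_25 (password : String) (out : String) : Prop := out = sum_25_alt password
instance (password : String) (out : String) : Decidable (Spec_sum_25 password out) := by unfold Spec_sum_25; infer_instance

-- ===== CLAIM (what is proved, stated in full; the proofs are below) =====
def Claim_equal_sum_25 : Prop := ∀ (password : String), Dom_sum_25 password → Spec_sum_25 password (sum_25 password)

-- ===== LEMMAS AND PROOFS =====

-- the two digit_sum variants agree
theorem pvDigitSum_eq (password : String) : pvDigitSumA password = pvDigitSumB password := by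
  unfold pvDigitSumA pvDigitSumB
  induction password.toList using List.reverseRecOn with
  | nil => rfl
  | append_singleton xs x ih =>
      simp [List.filter_append, List.foldl_append]
      split <;> simp_all

-- one unrolling of the closed form absorbs one '9'
theorem pvClosedB_step (diff : Int) (h : diff > 9) :
    pvClosedB diff = '9' :: pvClosedB (diff - 9) := by
  unfold pvClosedB
  rw [PySem.Int.floordiv_eq_ediv_of_pos (by omega : (0:Int) < 9),
      PySem.Int.mod_eq_emod_of_pos (by omega : (0:Int) < 9)]
  rw [if_neg (by omega : ¬ diff ≤ 9)]
  by_cases h2 : diff - 9 ≤ 9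
  · rw [if_pos h2]
    rw [show (diff - 1) / 9 = 1 by omega, show (diff - 1) % 9 + 1 = diff - 9 by omega]
    simp
  · rw [if_neg h2]
    rw [PySem.Int.floordiv_eq_ediv_of_pos (by omega : (0:Int) < 9),
        PySem.Int.mod_eq_emod_of_pos (by omega : (0:Int) < 9)]
    rw [show (diff - 1) / 9 = (diff - 9 - 1) / 9 + 1 by omega,
        show (diff - 1) % 9 = (diff - 9 - 1) % 9 by omega,
        show ((diff - 9 - 1) / 9 + 1).toNat = ((diff - 9 - 1) / 9).toNat + 1 by omega]
    simp [List.replicate_succ]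

-- A's loop computes the closed form appended to the accumulator
theorem pvLoopA_eq (diff : Int) (acc : List Char) :
    pvLoopA diff acc = acc ++ pvClosedB diff := by
  induction diff, acc using pvLoopA.induct with
  | case1 diff acc h ih =>
      rw [pvLoopA, if_pos h, ih, pvClosedB_step diff h]
      simp
  | case2 diff acc h =>
      rw [pvLoopA, if_neg h]
      unfold pvClosedB
      rw [if_pos (by omega)]

-- ===== VERDICT (by name: the statement is the Claim_ definition above) =====
theorem sum_25_spec : Claim_equal_sum_25 := by
  intro password _
  unfold Spec_sum_25 sum_25 sum_25_alt
  rw [pvDigitSum_eq, pvLoopA_eq]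
  simp
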